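-- pv_equiv track=rewrite | github.com/joshanashakya/dissertation | workspace/dataset/java-python/GeeksForGeeks/35/A/2.py | countMountains
-- ===== SOURCE A (Python) =====
-- def countMountains(a, n):
--     A = [[0 for i in range(n+2)] for i in range(n+2)]
--     count = 0
--
--     # form another matrix with one extra
--     # layer of border elements. Border
--     # elements will contain INT_MIN value.
--     for i in range(n+2):
--         for j in range(n+2):
--             if ((i == 0) or (j == 0) or
--                 (i == n + 1) or (j == n + 1)):
--
--                 # For border elements,
--                 # set value as INT_MIN
--                 A[i][j] = float('-inf')
--             else:
--
--                 # For rest elements, just copy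
--                 # it into new matrix
--                 A[i][j] = a[i - 1][j - 1]
--
--     # Check for mountains in the modified matrix
--     for i in range(n + 1):
--         for j in range(n + 1):
--             if ((A[i][j] > A[i - 1][j]) and
--                 (A[i][j] > A[i + 1][j]) and
--                 (A[i][j] > A[i][j - 1]) and
--                 (A[i][j] > A[i][j + 1]) and
--                 (A[i][j] > A[i - 1][j - 1]) and
--                 (A[i][j] > A[i + 1][j + 1]) and
--                 (A[i][j] > A[i - 1][j + 1]) and
--                 (A[i][j] > A[i + 1][j - 1])):
--                 count = count + 1
--
--     return count
-- ===== SOURCE B (Python) =====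
-- def countMountains(a, n):
--     NEG = float('-inf')
--     rows = [a[i][:n] for i in range(n)]
--     # separable max filter, pass 1: horizontal 3-window maxima per row,
--     # and per-row side maxima (window without the centre cell)
--     hmax = [[max(r[max(j - 1, 0):j + 2]) for j in range(n)] for r in rows]
--     smax = [[max(r[max(j - 1, 0):j] + r[j + 1:j + 2] or [NEG]) for j in range(n)]
--             for r in rows]
--     empty = [NEG] * n
--     # pass 2: a cell is a peak iff it beats the aggregated maxima above, below, beside
--     count = 0
--     for i in range(n):
--         up = hmax[i - 1] if i > 0 else empty
--         down = hmax[i + 1] if i + 1 < n else empty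
--         r, s = rows[i], smax[i]
--         for j in range(n):
--             if r[j] > up[j] and r[j] > down[j] and r[j] > s[j]:
--                 count += 1
--     return count
-- ===== Notes on version B (the rewrite author's own statement) =====
-- stated objective: alternative
-- what changed: B replaces A's padded-sentinel-matrix 8-neighbour scan with a separable max filter: a first pass precomputes horizontal 3-window maxima (and side maxima) per row, then each cell is compared against three aggregated maxima instead of its eight neighbours.
import Mathlib
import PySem

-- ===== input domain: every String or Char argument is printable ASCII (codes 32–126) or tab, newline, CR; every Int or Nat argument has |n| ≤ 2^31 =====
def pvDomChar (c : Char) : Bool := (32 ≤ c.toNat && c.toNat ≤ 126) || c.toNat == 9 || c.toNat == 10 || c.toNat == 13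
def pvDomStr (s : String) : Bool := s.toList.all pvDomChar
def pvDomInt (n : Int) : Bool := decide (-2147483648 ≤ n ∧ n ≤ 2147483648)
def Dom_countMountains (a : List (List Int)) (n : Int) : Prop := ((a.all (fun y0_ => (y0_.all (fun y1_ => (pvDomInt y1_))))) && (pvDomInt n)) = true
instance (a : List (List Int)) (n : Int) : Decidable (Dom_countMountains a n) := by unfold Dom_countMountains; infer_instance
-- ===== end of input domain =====

-- B replaces A's padded sentinel-matrix 8-neighbour scan by a separable max filter:
-- a first pass precomputes horizontal 3-window maxima (and side maxima) per row, a second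
-- pass compares each cell against three aggregated maxima (objective: alternative).
-- Return-value equivalence only; neither program mutates `a`.

-- ===== PORT A =====

-- Python's '>' restricted to the values A's padded matrix holds: ints and float('-inf');
-- `none` plays float('-inf') (an int is > -inf; -inf > -inf is false).
def pyGtNI : Option Int → Option Int → Bool
  | some x, some y => y < x
  | some _, none => true
  | none, _ => false

-- the first double loop of A: build the bordered matrix (border = none, inside = a[i-1][j-1]);
-- the pyGetD defaults are unreachable on inputs where the Python returns (Pre_ excludes the rest).
def padMat (a : List (List Int)) (n : Int) : List (List (Option Int)) :=
  (PySem.List.pyRange 0 (n+2) 1).map fun i =>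
    (PySem.List.pyRange 0 (n+2) 1).map fun j =>
      if i = 0 ∨ j = 0 ∨ i = n+1 ∨ j = n+1 then none
      else some (PySem.List.pyGetD (PySem.List.pyGetD a (i-1) []) (j-1) 0)

-- A[i][j] with Python's negative-index wraparound (pyGetD wraps); default unreachable in A's runs.
def padGet (A : List (List (Option Int))) (i j : Int) : Option Int :=
  PySem.List.pyGetD (PySem.List.pyGetD A i []) j none

def countMountains (a : List (List Int)) (n : Int) : Int :=
  let A := padMat a n
  (PySem.List.pyRange 0 (n+1) 1).foldl (fun count i =>
    (PySem.List.pyRange 0 (n+1) 1).foldl (fun count j =>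
      if pyGtNI (padGet A i j) (padGet A (i-1) j) &&
         pyGtNI (padGet A i j) (padGet A (i+1) j) &&
         pyGtNI (padGet A i j) (padGet A i (j-1)) &&
         pyGtNI (padGet A i j) (padGet A i (j+1)) &&
         pyGtNI (padGet A i j) (padGet A (i-1) (j-1)) &&
         pyGtNI (padGet A i j) (padGet A (i+1) (j+1)) &&
         pyGtNI (padGet A i j) (padGet A (i-1) (j+1)) &&
         pyGtNI (padGet A i j) (padGet A (i+1) (j-1))
      then count + 1 else count) count) 0

-- ===== PORT B =====

-- v > x where x is an int or float('-inf') (`none`); ints always beat -inf.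
def pyGtB : Int → Option Int → Bool
  | v, some y => decide (y < v)
  | _, none => true

-- rows = [a[i][:n] for i in range(n)]
def pvRows (a : List (List Int)) (n : Int) : List (List Int) :=
  (PySem.List.pyRange 0 n 1).map fun i =>
    PySem.List.slice (PySem.List.pyGetD a i []) (some 0) (some n)

-- hmax = [[max(r[max(j-1,0):j+2]) for j in range(n)] for r in rows]
-- (the window always contains r[j], so Python's max never sees an empty list; .getD 0 unreachable)
def pvHmax (rows : List (List Int)) (n : Int) : List (List Int) :=
  rows.map fun r =>
    (PySem.List.pyRange 0 n 1).map fun j =>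
      (PySem.List.max? (PySem.List.slice r (some (max (j-1) 0)) (some (j+2))) (fun x => x)).getD 0

-- smax = [[max(r[max(j-1,0):j] + r[j+1:j+2] or [NEG]) for j in range(n)] for r in rows]
-- (max of the possibly-empty side list, NEG = -inf for the empty one = `none`)
def pvSmax (rows : List (List Int)) (n : Int) : List (List (Option Int)) :=
  rows.map fun r =>
    (PySem.List.pyRange 0 n 1).map fun j =>
      PySem.List.max? (PySem.List.slice r (some (max (j-1) 0)) (some j) ++
                       PySem.List.slice r (some (j+1)) (some (j+2))) (fun x => x)

def countMountains_alt (a : List (List Int)) (n : Int) : Int :=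
  let rows := pvRows a n
  let hmax := pvHmax rows n
  let smax := pvSmax rows n
  let empty : List (Option Int) := List.replicate n.toNat none   -- [NEG] * n
  (PySem.List.pyRange 0 n 1).foldl (fun count i =>
    let up := if 0 < i then (PySem.List.pyGetD hmax (i-1) []).map some else empty
    let down := if i + 1 < n then (PySem.List.pyGetD hmax (i+1) []).map some else empty
    let r := PySem.List.pyGetD rows i []
    let s := PySem.List.pyGetD smax i []
    (PySem.List.pyRange 0 n 1).foldl (fun count j =>
      if pyGtB (PySem.List.pyGetD r j 0) (PySem.List.pyGetD up j none) &&
         pyGtB (PySem.List.pyGetD r j 0) (PySem.List.pyGetD down j none) &&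
         pyGtB (PySem.List.pyGetD r j 0) (PySem.List.pyGetD s j none)
      then count + 1 else count) count) 0

-- ===== PRECONDITION & SPEC =====
-- Pre_ excludes exactly the inputs on which the Python A raises IndexError:
-- n > 0 but a has fewer than n rows, or one of the first n rows has fewer than n entries.
def Pre_countMountains (a : List (List Int)) (n : Int) : Prop :=
  n ≤ 0 ∨ (n ≤ (a.length : Int) ∧ ∀ r ∈ a.take n.toNat, n ≤ (r.length : Int))
instance (a : List (List Int)) (n : Int) : Decidable (Pre_countMountains a n) := by
  unfold Pre_countMountains; infer_instance

def pvWitness_countMountains : List (List Int) × Int := ([[1, 2], [3, 4]], 2)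

def Spec_countMountains (a : List (List Int)) (n : Int) (out : Int) : Prop := out = countMountains_alt a n
instance (a : List (List Int)) (n : Int) (out : Int) : Decidable (Spec_countMountains a n out) := by unfold Spec_countMountains; infer_instance

-- ===== CLAIM (what is proved, stated in full; the proofs are below) =====
def Claim_equal_countMountains : Prop := ∀ (a : List (List Int)) (n : Int), Dom_countMountains a n → Pre_countMountains a n → Spec_countMountains a n (countMountains a n)

-- ===== LEMMAS AND PROOFS =====

-- proof-local views of the two loop bodies, plus the common 8-neighbour form condB
def condA (a : List (List Int)) (n i j : Int) : Bool :=
  pyGtNI (padGet (padMat a n) i j) (padGet (padMat a n) (i-1) j) &&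
  pyGtNI (padGet (padMat a n) i j) (padGet (padMat a n) (i+1) j) &&
  pyGtNI (padGet (padMat a n) i j) (padGet (padMat a n) i (j-1)) &&
  pyGtNI (padGet (padMat a n) i j) (padGet (padMat a n) i (j+1)) &&
  pyGtNI (padGet (padMat a n) i j) (padGet (padMat a n) (i-1) (j-1)) &&
  pyGtNI (padGet (padMat a n) i j) (padGet (padMat a n) (i+1) (j+1)) &&
  pyGtNI (padGet (padMat a n) i j) (padGet (padMat a n) (i-1) (j+1)) &&
  pyGtNI (padGet (padMat a n) i j) (padGet (padMat a n) (i+1) (j-1))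

def pvOffs : List (Int × Int) := [(-1,-1),(-1,0),(-1,1),(0,-1),(0,1),(1,-1),(1,0),(1,1)]

def getCell (a : List (List Int)) (i j : Int) : Int :=
  PySem.List.pyGetD (PySem.List.pyGetD a i []) j 0

def condB (a : List (List Int)) (n i j : Int) : Bool :=
  pvOffs.all (fun d =>
    !(decide (0 ≤ i + d.1) && decide (i + d.1 < n) &&
      decide (0 ≤ j + d.2) && decide (j + d.2 < n)) ||
    decide (getCell a (i + d.1) (j + d.2) < getCell a i j))

def condC (a : List (List Int)) (n i j : Int) : Bool :=
  pyGtB (PySem.List.pyGetD (PySem.List.pyGetD (pvRows a n) i []) j 0)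
    (PySem.List.pyGetD (if 0 < i then (PySem.List.pyGetD (pvHmax (pvRows a n) n) (i-1) []).map some
                        else List.replicate n.toNat none) j none) &&
  pyGtB (PySem.List.pyGetD (PySem.List.pyGetD (pvRows a n) i []) j 0)
    (PySem.List.pyGetD (if i + 1 < n then (PySem.List.pyGetD (pvHmax (pvRows a n) n) (i+1) []).map some
                        else List.replicate n.toNat none) j none) &&
  pyGtB (PySem.List.pyGetD (PySem.List.pyGetD (pvRows a n) i []) j 0)
    (PySem.List.pyGetD (PySem.List.pyGetD (pvSmax (pvRows a n) n) i []) j none)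

theorem pyGetD_neg_wrap {α : Type} (xs : List α) (i : Int) (d : α)
    (h1 : i < 0) (h2 : -(xs.length : Int) ≤ i) :
    PySem.List.pyGetD xs i d = PySem.List.pyGetD xs ((xs.length : Int) + i) d := by
  unfold PySem.List.pyGetD PySem.List.pyGet? PySem.List.pyIdx?
  rw [if_neg (by omega : ¬ (0:Int) ≤ i), if_pos h2,
      if_pos (by omega : (0:Int) ≤ (xs.length:Int) + i),
      if_pos (by omega : (xs.length:Int) + i < (xs.length:Int))]
  have he : xs.length - (-i).toNat = ((xs.length:Int) + i).toNat := by omega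
  rw [he]

theorem pyGetD_all_eq {α : Type} (xs : List α) (j : Int) (d : α) (h : ∀ x ∈ xs, x = d) :
    PySem.List.pyGetD xs j d = d := by
  unfold PySem.List.pyGetD PySem.List.pyGet?
  cases hk : PySem.List.pyIdx? xs.length j with
  | none => rfl
  | some k =>
    cases hx : xs[k]? with
    | none => simp only [Option.bind_some, hx, Option.getD_none]
    | some y =>
      simp only [Option.bind_some, Option.getD_some, hx]
      exact h y (List.mem_of_getElem? hx)

theorem padRow (a : List (List Int)) (n i : Int) (h0 : 0 ≤ i) (h1 : i < n + 2) :
    PySem.List.pyGetD (padMat a n) i [] =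
      (PySem.List.pyRange 0 (n+2) 1).map (fun j =>
        if i = 0 ∨ j = 0 ∨ i = n+1 ∨ j = n+1 then none else some (getCell a (i-1) (j-1))) := by
  unfold padMat
  rw [PySem.List.pyGetD_map_pyRange_of_nonneg _ (n+2) i [] h0 h1]
  rfl

theorem padGet_spec (a : List (List Int)) (n : Int) (hn : 0 < n) (i j : Int)
    (hi : -1 ≤ i) (hi' : i ≤ n+1) (hj : -1 ≤ j) (hj' : j ≤ n+1) :
    padGet (padMat a n) i j =
      if 1 ≤ i ∧ i ≤ n ∧ 1 ≤ j ∧ j ≤ n then some (getCell a (i-1) (j-1)) else none := by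
  have hlen : ((padMat a n).length : Int) = n + 2 := by
    unfold padMat
    simp only [List.length_map]
    rw [PySem.List.length_pyRange_one]
    omega
  have e : (n:Int) + 2 + -1 = n + 1 := by ring
  rcases lt_or_ge i 0 with hneg | hpos
  · have hie : i = -1 := by omega
    subst hie
    unfold padGet
    rw [pyGetD_neg_wrap (padMat a n) (-1) [] (by omega) (by omega)]
    rw [hlen, e]
    rw [padRow a n (n+1) (by omega) (by omega)]
    rw [if_neg (by omega)]
    apply pyGetD_all_eq
    intro x hx
    rcases List.mem_map.mp hx with ⟨j', _, rfl⟩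
    rw [if_pos (by omega)]
  · unfold padGet
    rw [padRow a n i hpos (by omega)]
    rcases lt_or_ge j 0 with hjn | hjp
    · have hje : j = -1 := by omega
      subst hje
      rw [pyGetD_neg_wrap _ (-1) none (by omega)
            (by simp only [List.length_map]; rw [PySem.List.length_pyRange_one]; omega)]
      simp only [List.length_map]
      rw [PySem.List.length_pyRange_one]
      rw [show ((((n:Int)+2-0).toNat : Int) + -1) = n + 1 from by omega]
      rw [PySem.List.pyGetD_map_pyRange_of_nonneg _ (n+2) (n+1) none (by omega) (by omega)]
      rw [if_pos (by omega), if_neg (by omega)]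
    · rw [PySem.List.pyGetD_map_pyRange_of_nonneg _ (n+2) j none hjp (by omega)]
      split_ifs <;> first | rfl | omega

theorem condA_left_zero (a : List (List Int)) (n : Int) (hn : 0 < n) (j : Int)
    (hj : 0 ≤ j) (hj' : j ≤ n) : condA a n 0 j = false := by
  unfold condA
  rw [padGet_spec a n hn 0 j (by omega) (by omega) (by omega) (by omega)]
  rw [if_neg (by omega)]
  simp [pyGtNI]

theorem condA_bottom_zero (a : List (List Int)) (n : Int) (hn : 0 < n) (i : Int)
    (hi : 0 ≤ i) (hi' : i ≤ n) : condA a n i 0 = false := by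
  unfold condA
  rw [padGet_spec a n hn i 0 (by omega) (by omega) (by omega) (by omega)]
  rw [if_neg (by omega)]
  simp [pyGtNI]

theorem term_eq (a : List (List Int)) (n : Int) (hn : 0 < n) (v p q : Int)
    (hp : -1 ≤ p) (hp' : p ≤ n+1) (hq : -1 ≤ q) (hq' : q ≤ n+1) :
    pyGtNI (some v) (padGet (padMat a n) p q) =
      (!(decide (0 ≤ p - 1) && decide (p - 1 < n) &&
         decide (0 ≤ q - 1) && decide (q - 1 < n)) ||
       decide (getCell a (p-1) (q-1) < v)) := by
  rw [padGet_spec a n hn p q hp hp' hq hq']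
  by_cases h : 1 ≤ p ∧ p ≤ n ∧ 1 ≤ q ∧ q ≤ n
  · rw [if_pos h]
    have h1 : (0:Int) ≤ p - 1 := by omega
    have h2 : p - 1 < n := by omega
    have h3 : (0:Int) ≤ q - 1 := by omega
    have h4 : q - 1 < n := by omega
    simp [pyGtNI, h2, h4]
    intro hc
    exact absurd hc (by omega)
  · rw [if_neg h]
    have hf : ¬ (0 ≤ p - 1 ∧ p - 1 < n ∧ 0 ≤ q - 1 ∧ q - 1 < n) := by omega
    rw [Bool.eq_iff_iff]
    simp only [pyGtNI, Bool.or_eq_true, Bool.not_eq_true', Bool.and_eq_false_iff,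
      decide_eq_true_eq, decide_eq_false_iff_not]
    constructor
    · intro _
      left
      omega
    · intro _
      trivial

theorem condA_succ (a : List (List Int)) (n : Int) (hn : 0 < n) (i j : Int)
    (hi : 0 ≤ i) (hi' : i < n) (hj : 0 ≤ j) (hj' : j < n) :
    condA a n (i+1) (j+1) = condB a n i j := by
  unfold condA condB
  rw [padGet_spec a n hn (i+1) (j+1) (by omega) (by omega) (by omega) (by omega)]
  rw [if_pos (by omega)]
  rw [show i+1-1 = i from by ring, show j+1-1 = j from by ring,
      show i+1+1 = i+2 from by ring, show j+1+1 = j+2 from by ring]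
  rw [term_eq a n hn _ i (j+1) (by omega) (by omega) (by omega) (by omega),
      term_eq a n hn _ (i+2) (j+1) (by omega) (by omega) (by omega) (by omega),
      term_eq a n hn _ (i+1) j (by omega) (by omega) (by omega) (by omega),
      term_eq a n hn _ (i+1) (j+2) (by omega) (by omega) (by omega) (by omega),
      term_eq a n hn _ i j (by omega) (by omega) (by omega) (by omega),
      term_eq a n hn _ (i+2) (j+2) (by omega) (by omega) (by omega) (by omega),
      term_eq a n hn _ i (j+2) (by omega) (by omega) (by omega) (by omega),
      term_eq a n hn _ (i+2) j (by omega) (by omega) (by omega) (by omega)]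
  rw [show i+1-1 = i from by ring, show j+1-1 = j from by ring,
      show i+2-1 = i+1 from by ring, show j+2-1 = j+1 from by ring]
  simp only [pvOffs, List.all_cons, List.all_nil, Bool.and_true]
  rw [show i + (-1:Int) = i - 1 from by ring, show j + (-1:Int) = j - 1 from by ring,
      show i + (0:Int) = i from by ring, show j + (0:Int) = j from by ring]
  rw [Bool.eq_iff_iff]
  simp only [Bool.and_eq_true]
  tauto

theorem countA_eq (a : List (List Int)) (n : Int) :
    countMountains a n =
      ((PySem.List.pyRange 0 (n+1) 1).map (fun i =>
        ((List.countP (fun j => condA a n i j) (PySem.List.pyRange 0 (n+1) 1) : Nat) : Int))).sum := by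
  unfold countMountains condA
  simp only [PySem.List.foldl_count_if, PySem.List.foldl_add, zero_add]

theorem countC_eq (a : List (List Int)) (n : Int) :
    countMountains_alt a n =
      ((PySem.List.pyRange 0 n 1).map (fun i =>
        ((List.countP (fun j => condC a n i j) (PySem.List.pyRange 0 n 1) : Nat) : Int))).sum := by
  unfold countMountains_alt condC
  simp only [PySem.List.foldl_count_if, PySem.List.foldl_add, zero_add]

-- ---- B-side characterisation ----

theorem pyGtB_max? (v : Int) (l : List Int) :
    pyGtB v (PySem.List.max? l (fun x => x)) = l.all (fun y => decide (y < v)) := by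
  cases hm : PySem.List.max? l (fun x => x) with
  | none =>
    rw [PySem.List.max?_eq_none_iff] at hm
    subst hm; rfl
  | some m =>
    have hmem := PySem.List.max?_mem hm
    have hmax := PySem.List.max?_isMax hm
    rw [Bool.eq_iff_iff]
    simp only [pyGtB, decide_eq_true_eq, List.all_eq_true]
    constructor
    · intro h y hy; exact lt_of_le_of_lt (hmax y hy) h
    · intro h; exact h m hmem

theorem pyGtB_max?_getD (v : Int) (l : List Int) (hne : l ≠ []) :
    pyGtB v (some ((PySem.List.max? l (fun x => x)).getD 0)) = l.all (fun y => decide (y < v)) := by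
  cases hm : PySem.List.max? l (fun x => x) with
  | none => exact absurd ((PySem.List.max?_eq_none_iff _ _).mp hm) hne
  | some m =>
    rw [Option.getD_some, ← pyGtB_max? v l, hm]

theorem all_window (r : List Int) (lo m : Nat) (p : Int → Bool) :
    ((r.drop lo).take m).all p = true ↔
      ∀ k : Nat, lo ≤ k → k < lo + m → ∀ (hk : k < r.length), p r[k] = true := by
  rw [List.all_eq_true]
  constructor
  · intro h k h1 h2 hk
    apply h
    have hlt : k - lo < ((r.drop lo).take m).length := by
      simp [List.length_take, List.length_drop]; omega
    have : ((r.drop lo).take m)[k - lo]'hlt = r[k] := by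
      rw [List.getElem_take, List.getElem_drop]
      congr 1; omega
    rw [← this]
    exact List.getElem_mem hlt
  · intro h x hx
    rcases List.mem_iff_getElem.mp hx with ⟨k, hk, rfl⟩
    have hk' := hk
    simp [List.length_take, List.length_drop] at hk'
    rw [List.getElem_take, List.getElem_drop]
    exact h (lo + k) (by omega) (by omega) (by omega)

theorem row_len (a : List (List Int)) (n : Int) (hpre : Pre_countMountains a n)
    (i : Int) (h0 : 0 ≤ i) (h1 : i < n) :
    n.toNat ≤ (PySem.List.pyGetD a i []).length := by
  rcases hpre with h | ⟨hlen, hrows⟩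
  · omega
  · have hi : i.toNat < a.length := by omega
    have hg : PySem.List.pyGetD a i [] = a[i.toNat] :=
      PySem.List.pyGetD_eq_getElem a [] h0 (by omega)
    have hmem : a[i.toNat] ∈ a.take n.toNat := by
      have hlt : i.toNat < (a.take n.toNat).length := by
        simp [List.length_take]; omega
      have : (a.take n.toNat)[i.toNat]'hlt = a[i.toNat] := List.getElem_take
      rw [← this]; exact List.getElem_mem hlt
    have := hrows _ hmem
    rw [hg]; omega

theorem rows_get (a : List (List Int)) (n : Int) (hpre : Pre_countMountains a n)
    (i : Int) (h0 : 0 ≤ i) (h1 : i < n) :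
    PySem.List.pyGetD (pvRows a n) i [] = (PySem.List.pyGetD a i []).take n.toNat ∧
    ((PySem.List.pyGetD a i []).take n.toNat).length = n.toNat := by
  constructor
  · unfold pvRows
    rw [PySem.List.pyGetD_map_pyRange_of_nonneg _ n i [] h0 h1]
    rw [PySem.List.slice_zero_start, PySem.List.slice_to _ (by omega : (0:Int) ≤ n)]
  · have := row_len a n hpre i h0 h1
    simp [List.length_take]; omega

theorem row_elem (a : List (List Int)) (n : Int) (i : Int) (_h0 : 0 ≤ i) (_h1 : i < n)
    (hlen : n.toNat ≤ (PySem.List.pyGetD a i []).length)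
    (k : Nat) (hk : k < n.toNat) :
    ((PySem.List.pyGetD a i []).take n.toNat)[k]'(by simp [List.length_take]; omega) =
      getCell a i (k : Int) := by
  rw [List.getElem_take]
  unfold getCell
  rw [PySem.List.pyGetD_eq_getElem _ 0 (by omega) (by omega)]
  simp

theorem win_all_iff (a : List (List Int)) (n : Int) (p j v : Int)
    (hp : 0 ≤ p) (hp' : p < n) (hj : 0 ≤ j) (hj' : j < n)
    (hlen : n.toNat ≤ (PySem.List.pyGetD a p []).length) :
    (pyGtB v (some ((PySem.List.max?
        (PySem.List.slice ((PySem.List.pyGetD a p []).take n.toNat)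
          (some (max (j-1) 0)) (some (j+2))) (fun x => x)).getD 0)) = true) ↔
      ((0 ≤ j-1 → getCell a p (j-1) < v) ∧ getCell a p j < v ∧ (j+1 < n → getCell a p (j+1) < v)) := by
  set r := (PySem.List.pyGetD a p []).take n.toNat with hr
  have hrlen : r.length = n.toNat := by rw [hr]; simp [List.length_take]; omega
  rw [PySem.List.slice_toNat _ (by omega : (0:Int) ≤ max (j-1) 0) (by omega : (0:Int) ≤ j+2)]
  set lo := (max (j-1) 0).toNat with hlo
  set m := (j+2).toNat - lo with hm
  have hne : (r.drop lo).take m ≠ [] := by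
    apply List.ne_nil_of_length_pos
    simp [List.length_take, List.length_drop]; omega
  rw [pyGtB_max?_getD v _ hne, all_window]
  constructor
  · intro h
    refine ⟨?_, ?_, ?_⟩
    · intro hb
      have := h (j-1).toNat (by omega) (by omega) (by omega)
      rw [row_elem a n p hp hp' hlen _ (by omega)] at this
      rw [show (((j-1).toNat : Int)) = j - 1 from by omega] at this
      exact of_decide_eq_true this
    · have := h j.toNat (by omega) (by omega) (by omega)
      rw [row_elem a n p hp hp' hlen _ (by omega)] at this
      rw [show ((j.toNat : Int)) = j from by omega] at this
      exact of_decide_eq_true this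
    · intro hb
      have := h (j+1).toNat (by omega) (by omega) (by omega)
      rw [row_elem a n p hp hp' hlen _ (by omega)] at this
      rw [show (((j+1).toNat : Int)) = j + 1 from by omega] at this
      exact of_decide_eq_true this
  · rintro ⟨h1, h2, h3⟩ k hk1 hk2 hk3
    rw [hrlen] at hk3
    rw [row_elem a n p hp hp' hlen k hk3]
    apply decide_eq_true
    have : (k : Int) = j - 1 ∨ (k : Int) = j ∨ (k : Int) = j + 1 := by omega
    rcases this with h | h | h <;> rw [h]
    · exact h1 (by omega)
    · exact h2
    · exact h3 (by omega)

theorem side_all_iff (a : List (List Int)) (n : Int) (p j v : Int)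
    (hp : 0 ≤ p) (hp' : p < n) (hj : 0 ≤ j) (hj' : j < n)
    (hlen : n.toNat ≤ (PySem.List.pyGetD a p []).length) :
    (pyGtB v (PySem.List.max?
        (PySem.List.slice ((PySem.List.pyGetD a p []).take n.toNat) (some (max (j-1) 0)) (some j) ++
         PySem.List.slice ((PySem.List.pyGetD a p []).take n.toNat) (some (j+1)) (some (j+2)))
        (fun x => x)) = true) ↔
      ((0 ≤ j-1 → getCell a p (j-1) < v) ∧ (j+1 < n → getCell a p (j+1) < v)) := by
  set r := (PySem.List.pyGetD a p []).take n.toNat with hr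
  have hrlen : r.length = n.toNat := by rw [hr]; simp [List.length_take]; omega
  rw [PySem.List.slice_toNat _ (by omega : (0:Int) ≤ max (j-1) 0) (by omega : (0:Int) ≤ j),
      PySem.List.slice_toNat _ (by omega : (0:Int) ≤ j+1) (by omega : (0:Int) ≤ j+2)]
  rw [pyGtB_max?, List.all_append, Bool.and_eq_true, all_window, all_window]
  constructor
  · rintro ⟨hL, hR⟩
    constructor
    · intro hb
      have := hL (j-1).toNat (by omega) (by omega) (by omega)
      rw [row_elem a n p hp hp' hlen _ (by omega)] at this
      rw [show (((j-1).toNat : Int)) = j - 1 from by omega] at this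
      exact of_decide_eq_true this
    · intro hb
      have := hR (j+1).toNat (by omega) (by omega) (by omega)
      rw [row_elem a n p hp hp' hlen _ (by omega)] at this
      rw [show (((j+1).toNat : Int)) = j + 1 from by omega] at this
      exact of_decide_eq_true this
  · rintro ⟨h1, h2⟩
    constructor
    · intro k hk1 hk2 hk3
      rw [hrlen] at hk3
      rw [row_elem a n p hp hp' hlen k hk3]
      apply decide_eq_true
      have : (k : Int) = j - 1 := by omega
      rw [this]
      exact h1 (by omega)
    · intro k hk1 hk2 hk3
      rw [hrlen] at hk3
      rw [row_elem a n p hp hp' hlen k hk3]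
      apply decide_eq_true
      have : (k : Int) = j + 1 := by omega
      rw [this]
      exact h2 (by omega)

theorem hmax_get (a : List (List Int)) (n : Int) (p : Int) (h0 : 0 ≤ p) (h1 : p < n)
    (j : Int) (hj : 0 ≤ j) (hj' : j < n) :
    PySem.List.pyGetD ((PySem.List.pyGetD (pvHmax (pvRows a n) n) p []).map some) j none =
      some ((PySem.List.max?
        (PySem.List.slice (PySem.List.slice (PySem.List.pyGetD a p []) (some 0) (some n))
          (some (max (j-1) 0)) (some (j+2))) (fun x => x)).getD 0) := by
  unfold pvHmax pvRows
  rw [List.map_map]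
  rw [PySem.List.pyGetD_map_pyRange_of_nonneg _ n p [] h0 h1]
  simp only [Function.comp_apply]
  rw [List.map_map]
  rw [PySem.List.pyGetD_map_pyRange_of_nonneg _ n j none hj hj']
  simp only [Function.comp_apply]

theorem smax_get (a : List (List Int)) (n : Int) (p : Int) (h0 : 0 ≤ p) (h1 : p < n)
    (j : Int) (hj : 0 ≤ j) (hj' : j < n) :
    PySem.List.pyGetD (PySem.List.pyGetD (pvSmax (pvRows a n) n) p []) j none =
      PySem.List.max?
        (PySem.List.slice (PySem.List.slice (PySem.List.pyGetD a p []) (some 0) (some n)) (some (max (j-1) 0)) (some j) ++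
         PySem.List.slice (PySem.List.slice (PySem.List.pyGetD a p []) (some 0) (some n)) (some (j+1)) (some (j+2)))
        (fun x => x) := by
  unfold pvSmax pvRows
  rw [List.map_map]
  rw [PySem.List.pyGetD_map_pyRange_of_nonneg _ n p [] h0 h1]
  simp only [Function.comp_apply]
  rw [PySem.List.pyGetD_map_pyRange_of_nonneg _ n j none hj hj']

theorem repl_get (n : Int) (j : Int) (hj : 0 ≤ j) (hj' : j < n) :
    PySem.List.pyGetD (List.replicate n.toNat (none : Option Int)) j none = none := by
  rw [PySem.List.pyGetD_eq_getElem _ none hj (by simp; omega)]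
  simp

theorem condC_eq_condB (a : List (List Int)) (n : Int) (hpre : Pre_countMountains a n)
    (hn : 0 < n) (i j : Int) (hi : 0 ≤ i) (hi' : i < n) (hj : 0 ≤ j) (hj' : j < n) :
    condC a n i j = condB a n i j := by
  have hsl : ∀ p : Int, PySem.List.slice (PySem.List.pyGetD a p []) (some 0) (some n) =
      (PySem.List.pyGetD a p []).take n.toNat := by
    intro p
    rw [PySem.List.slice_zero_start, PySem.List.slice_to _ (by omega : (0:Int) ≤ n)]
  obtain ⟨hr, hrlen⟩ := rows_get a n hpre i hi hi'
  have hleni := row_len a n hpre i hi hi'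
  -- the centre value
  have hv : PySem.List.pyGetD (PySem.List.pyGetD (pvRows a n) i []) j 0 = getCell a i j := by
    rw [hr, PySem.List.pyGetD_eq_getElem _ 0 hj (by rw [hrlen]; omega)]
    rw [row_elem a n i hi hi' hleni j.toNat (by omega)]
    congr 1; omega
  unfold condC
  rw [hv]
  rw [Bool.eq_iff_iff, Bool.and_eq_true, Bool.and_eq_true]
  -- expand condB
  have or4 : ∀ {A1 A2 A3 A4 G : Prop}, (((((¬A1 ∨ ¬A2) ∨ ¬A3) ∨ ¬A4) ∨ G) ↔ (A1 → A2 → A3 → A4 → G)) := by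
    intros; tauto
  have hcondB : condB a n i j = true ↔
      ((0 ≤ i-1 → i-1 < n → 0 ≤ j-1 → j-1 < n → getCell a (i-1) (j-1) < getCell a i j) ∧
       (0 ≤ i-1 → i-1 < n → 0 ≤ j → j < n → getCell a (i-1) j < getCell a i j) ∧
       (0 ≤ i-1 → i-1 < n → 0 ≤ j+1 → j+1 < n → getCell a (i-1) (j+1) < getCell a i j) ∧
       (0 ≤ i → i < n → 0 ≤ j-1 → j-1 < n → getCell a i (j-1) < getCell a i j) ∧
       (0 ≤ i → i < n → 0 ≤ j+1 → j+1 < n → getCell a i (j+1) < getCell a i j) ∧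
       (0 ≤ i+1 → i+1 < n → 0 ≤ j-1 → j-1 < n → getCell a (i+1) (j-1) < getCell a i j) ∧
       (0 ≤ i+1 → i+1 < n → 0 ≤ j → j < n → getCell a (i+1) j < getCell a i j) ∧
       (0 ≤ i+1 → i+1 < n → 0 ≤ j+1 → j+1 < n → getCell a (i+1) (j+1) < getCell a i j)) := by
    unfold condB pvOffs
    simp only [List.all_cons, List.all_nil, Bool.and_true, Bool.and_eq_true,
      Bool.or_eq_true, Bool.not_eq_true', Bool.and_eq_false_iff,
      decide_eq_true_eq, decide_eq_false_iff_not]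
    rw [show i + (-1:Int) = i - 1 from by ring, show j + (-1:Int) = j - 1 from by ring,
        show i + (0:Int) = i from by ring, show j + (0:Int) = j from by ring]
    simp only [or4]
  rw [hcondB]
  -- the three B-side conjuncts
  have hup : (pyGtB (getCell a i j)
      (PySem.List.pyGetD (if 0 < i then (PySem.List.pyGetD (pvHmax (pvRows a n) n) (i-1) []).map some
                          else List.replicate n.toNat none) j none) = true) ↔
      (0 < i → ((0 ≤ j-1 → getCell a (i-1) (j-1) < getCell a i j) ∧
                getCell a (i-1) j < getCell a i j ∧
                (j+1 < n → getCell a (i-1) (j+1) < getCell a i j))) := by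
    by_cases hip : 0 < i
    · rw [if_pos hip, hmax_get a n (i-1) (by omega) (by omega) j hj hj', hsl]
      rw [win_all_iff a n (i-1) j (getCell a i j) (by omega) (by omega) hj hj'
            (row_len a n hpre (i-1) (by omega) (by omega))]
      constructor
      · exact fun h _ => h
      · exact fun h => h hip
    · rw [if_neg hip, repl_get n j hj hj']
      simp [pyGtB]
      omega
  have hdown : (pyGtB (getCell a i j)
      (PySem.List.pyGetD (if i + 1 < n then (PySem.List.pyGetD (pvHmax (pvRows a n) n) (i+1) []).map some
                          else List.replicate n.toNat none) j none) = true) ↔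
      (i + 1 < n → ((0 ≤ j-1 → getCell a (i+1) (j-1) < getCell a i j) ∧
                    getCell a (i+1) j < getCell a i j ∧
                    (j+1 < n → getCell a (i+1) (j+1) < getCell a i j))) := by
    by_cases hip : i + 1 < n
    · rw [if_pos hip, hmax_get a n (i+1) (by omega) (by omega) j hj hj', hsl]
      rw [win_all_iff a n (i+1) j (getCell a i j) (by omega) (by omega) hj hj'
            (row_len a n hpre (i+1) (by omega) (by omega))]
      constructor
      · exact fun h _ => h
      · exact fun h => h hip
    · rw [if_neg hip, repl_get n j hj hj']
      simp [pyGtB]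
      omega
  have hside : (pyGtB (getCell a i j)
      (PySem.List.pyGetD (PySem.List.pyGetD (pvSmax (pvRows a n) n) i []) j none) = true) ↔
      ((0 ≤ j-1 → getCell a i (j-1) < getCell a i j) ∧
       (j+1 < n → getCell a i (j+1) < getCell a i j)) := by
    rw [smax_get a n i hi hi' j hj hj', hsl]
    exact side_all_iff a n i j (getCell a i j) hi hi' hj hj' hleni
  rw [hup, hdown, hside]
  constructor
  · rintro ⟨⟨h1, h2⟩, h3⟩
    refine ⟨?_, ?_, ?_, ?_, ?_, ?_, ?_, ?_⟩ <;> intros <;>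
      first
      | exact (h1 (by omega)).1 (by omega)
      | exact (h1 (by omega)).2.1
      | exact (h1 (by omega)).2.2 (by omega)
      | exact h3.1 (by omega)
      | exact h3.2 (by omega)
      | exact (h2 (by omega)).1 (by omega)
      | exact (h2 (by omega)).2.1
      | exact (h2 (by omega)).2.2 (by omega)
  · rintro ⟨t1, t2, t3, t4, t5, t6, t7, t8⟩
    refine ⟨⟨?_, ?_⟩, ⟨fun hb => t4 (by omega) (by omega) hb (by omega),
                       fun hb => t5 (by omega) (by omega) (by omega) hb⟩⟩
    · intro hip
      exact ⟨fun hb => t1 (by omega) (by omega) hb (by omega),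
             t2 (by omega) (by omega) (by omega) (by omega),
             fun hb => t3 (by omega) (by omega) (by omega) hb⟩
    · intro hip
      exact ⟨fun hb => t6 (by omega) hip hb (by omega),
             t7 (by omega) hip (by omega) (by omega),
             fun hb => t8 (by omega) hip (by omega) hb⟩

theorem shift_range (n : Int) (hn : 0 < n) :
    PySem.List.pyRange 0 (n+1) 1 = 0 :: (PySem.List.pyRange 0 n 1).map (· + 1) := by
  rw [PySem.List.pyRange_one_cons (by omega : (0:Int) < n + 1)]
  rw [show (0:Int) + 1 = 1 from by ring]
  rw [PySem.List.pyRange_one, PySem.List.pyRange_one, List.map_map]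
  rw [show n + 1 - 1 = n - 0 from by ring]
  apply congrArg
  apply List.map_congr_left
  intro k _
  simp
  omega

theorem main_eq (a : List (List Int)) (n : Int) (hpre : Pre_countMountains a n) :
    countMountains a n = countMountains_alt a n := by
  rcases lt_or_ge 0 n with hn | hn
  · rw [countA_eq, countC_eq, shift_range n hn]
    rw [List.map_cons, List.sum_cons, List.map_map]
    have hzero : List.countP (fun j => condA a n 0 j)
        (0 :: (PySem.List.pyRange 0 n 1).map (· + 1)) = 0 := by
      rw [List.countP_eq_zero]
      intro j hj
      have hb : 0 ≤ j ∧ j ≤ n := by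
        rcases List.mem_cons.mp hj with h | h
        · omega
        · rcases List.mem_map.mp h with ⟨x, hx, rfl⟩
          have := PySem.List.mem_pyRange_one.mp hx
          omega
      simp [condA_left_zero a n hn j hb.1 hb.2]
    rw [hzero]
    simp only [Nat.cast_zero, zero_add]
    apply congrArg
    apply List.map_congr_left
    intro i hi
    have hib := PySem.List.mem_pyRange_one.mp hi
    simp only [Function.comp_apply]
    apply congrArg
    rw [List.countP_cons]
    have hbot : condA a n (i+1) 0 = false :=
      condA_bottom_zero a n hn (i+1) (by omega) (by omega)
    simp only [hbot, Bool.false_eq_true, if_false, add_zero]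
    rw [List.countP_map]
    apply List.countP_congr
    intro j hj
    have hjb := PySem.List.mem_pyRange_one.mp hj
    simp only [Function.comp_apply]
    rw [condA_succ a n hn i j (by omega) (by omega) (by omega) (by omega)]
    rw [condC_eq_condB a n hpre hn i j (by omega) (by omega) (by omega) (by omega)]
  · rcases eq_or_lt_of_le hn with he | hlt
    · subst he
      have h1 : PySem.List.pyRange 0 ((0:Int)+1) 1 = [0] := by decide
      have h0 : PySem.List.pyRange 0 (0:Int) 1 = [] := by decide
      have hM : padMat a 0 = [[none, none], [none, none]] := by
        unfold padMat
        rw [show ((0:Int)+2) = 2 from by norm_num]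
        rw [(by decide : PySem.List.pyRange 0 (2:Int) 1 = [0, 1])]
        norm_num
      unfold countMountains countMountains_alt
      rw [h1, h0, hM]
      simp [padGet, pyGtNI, PySem.List.pyGetD, PySem.List.pyGet?, PySem.List.pyIdx?]
    · have h1 : PySem.List.pyRange 0 (n+1) 1 = [] :=
        PySem.List.pyRange_one_eq_nil (by omega)
      have h0 : PySem.List.pyRange 0 n 1 = [] :=
        PySem.List.pyRange_one_eq_nil (by omega)
      simp [countMountains, countMountains_alt, h0, h1]

-- ===== VERDICT (by name: the statement is the Claim_ definition above) =====
theorem countMountains_spec : Claim_equal_countMountains := by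
  intro a n _ hpre
  unfold Spec_countMountains
  exact main_eq a n hpre
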